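-- pv_equiv track=rewrite | github.com/rubelw/OSSS | src/OSSS/ai/agents/query_data/handlers/meetings_handler.py | _select_meetings_fields
-- ===== SOURCE A (Python) =====
-- from typing import Any, Dict, List, Sequence
--
-- def _select_meetings_fields(rows: Sequence[Dict[str, Any]]) -> List[str]:
--     if not rows:
--         return []
--
--     preferred_order = [
--         "id",
--         "meeting_code",
--         "meeting_type",
--         "board_id",
--         "board_name",
--         "title",
--         "date",
--         "start_time",
--         "end_time",
--         "location",
--         "status",
--         "is_special",
--         "is_public",
--         "created_at",
--         "updated_at",
--     ]
--
--     all_keys: List[str] = []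
--     for r in rows:
--         for k in r.keys():
--             if k not in all_keys:
--                 all_keys.append(k)
--
--     ordered = [c for c in preferred_order if c in all_keys]
--     ordered.extend(k for k in all_keys if k not in ordered)
--     return ordered
-- ===== SOURCE B (Python) =====
-- from typing import Any, Dict, List, Sequence
--
-- def _select_meetings_fields(rows: Sequence[Dict[str, Any]]) -> List[str]:
--     preferred_order = [
--         "id",
--         "meeting_code",
--         "meeting_type",
--         "board_id",
--         "board_name",
--         "title",
--         "date",
--         "start_time",
--         "end_time",
--         "location",
--         "status",
--         "is_special",
--         "is_public",
--         "created_at",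
--         "updated_at",
--     ]
--     n = len(preferred_order)
--     rank = {c: i for i, c in enumerate(preferred_order)}
--     # assign every distinct key a sort rank: preferred keys keep their preferred
--     # index, every other key gets n + its first-seen position (all ranks distinct)
--     seen_at: Dict[str, int] = {}
--     for r in rows:
--         for k in r.keys():
--             if k not in seen_at:
--                 seen_at[k] = n + len(seen_at)
--     return sorted(seen_at, key=lambda k: rank[k] if k in rank else seen_at[k])
-- ===== Notes on version B (the rewrite author's own statement) =====
-- stated objective: faster
-- what changed: Instead of A's dedup-list-then-filter-then-extend passes with linear membership scans, B assigns every distinct key a numeric sort rank (its preferred index, or n + its first-seen position) in one dict-building scan and returns the keys sorted once by that rank.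
import Mathlib
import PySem

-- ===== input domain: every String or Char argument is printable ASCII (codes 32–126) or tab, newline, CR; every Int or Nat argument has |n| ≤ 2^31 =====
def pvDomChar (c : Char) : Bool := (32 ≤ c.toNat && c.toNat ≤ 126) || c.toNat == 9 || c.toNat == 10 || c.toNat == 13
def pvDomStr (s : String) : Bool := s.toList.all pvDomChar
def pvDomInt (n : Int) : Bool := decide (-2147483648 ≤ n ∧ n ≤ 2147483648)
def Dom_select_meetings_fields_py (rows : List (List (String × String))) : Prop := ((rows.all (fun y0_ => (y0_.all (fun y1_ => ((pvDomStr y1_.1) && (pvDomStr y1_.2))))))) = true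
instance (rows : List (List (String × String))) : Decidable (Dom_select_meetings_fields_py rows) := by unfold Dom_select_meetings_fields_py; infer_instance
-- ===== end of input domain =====

-- B replaces A's dedup-then-filter-then-extend passes by assigning every distinct
-- key a numeric rank (preferred index, or n + first-seen position) and sorting once.


-- ===== PORT A =====
def pvPreferredA : List String :=
  ["id", "meeting_code", "meeting_type", "board_id", "board_name", "title", "date",
   "start_time", "end_time", "location", "status", "is_special", "is_public",
   "created_at", "updated_at"]

-- inner loop of A: "for k in r.keys(): if k not in all_keys: all_keys.append(k)"
def pvAKeysRow (acc : List String) (r : List (String × String)) : List String :=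
  r.foldl (fun acc2 kv => if kv.1 ∈ acc2 then acc2 else acc2 ++ [kv.1]) acc

def select_meetings_fields_py (rows : List (List (String × String))) : List String :=
  if rows = [] then []
  else
    let all_keys := rows.foldl pvAKeysRow []
    let ordered := pvPreferredA.filter (fun c => decide (c ∈ all_keys))
    -- "ordered.extend(k for k in all_keys if k not in ordered)" — the generator sees
    -- the growing 'ordered', so it is the same membership-append loop
    all_keys.foldl (fun acc k => if k ∈ acc then acc else acc ++ [k]) ordered

-- ===== PORT B =====
def pvPreferredAlt : List String :=
  ["id", "meeting_code", "meeting_type", "board_id", "board_name", "title", "date",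
   "start_time", "end_time", "location", "status", "is_special", "is_public",
   "created_at", "updated_at"]

-- rank = {c: i for i, c in enumerate(preferred_order)}
def pvRank : PySem.Dict String Int :=
  (PySem.List.enumerate pvPreferredAlt).foldl
    (fun d p => d.insert p.2 p.1) PySem.Dict.empty

-- the seen_at loop body: "if k not in seen_at: seen_at[k] = n + len(seen_at)"
def pvSeenStep (d : PySem.Dict String Int) (k : String) : PySem.Dict String Int :=
  if d.contains k then d
  else d.insert k ((pvPreferredAlt.length : Int) + (d.size : Int))

def select_meetings_fields_py_alt (rows : List (List (String × String))) : List String :=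
  let seen := rows.foldl (fun d r => r.foldl (fun d2 kv => pvSeenStep d2 kv.1) d)
    PySem.Dict.empty
  PySem.List.sorted seen.keys
    (fun k => if pvRank.contains k then pvRank.getD k 0 else seen.getD k 0) false

-- ===== PRECONDITION & SPEC =====
def Spec_select_meetings_fields_py (rows : List (List (String × String))) (out : List String) : Prop := out = select_meetings_fields_py_alt rows
instance (rows : List (List (String × String))) (out : List String) : Decidable (Spec_select_meetings_fields_py rows out) := by unfold Spec_select_meetings_fields_py; infer_instance

-- ===== CLAIM (what is proved, stated in full; the proofs are below) =====
def Claim_equal_select_meetings_fields_py : Prop := ∀ (rows : List (List (String × String))), Dom_select_meetings_fields_py rows → Spec_select_meetings_fields_py rows (select_meetings_fields_py rows)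

-- ===== LEMMAS AND PROOFS =====

-- B's seen_at dict after scanning keys list l from state pvStateOf acc:
-- it is exactly A's dedup list paired with ranks 15, 16, …
def pvStateOf (l : List String) : PySem.Dict String Int :=
  PySem.Dict.mk ((PySem.List.enumerate l 15).map (fun p => (p.2, p.1)))

theorem pvEnum_any (l : List String) (k : String) : ∀ (s : Int),
    (((PySem.List.enumerate l s).map (fun p => (p.2, p.1))).any (fun p => p.1 == k))
    = decide (k ∈ l) := by
  induction l with
  | nil => intro s; simp [PySem.List.enumerate_nil]
  | cons x t ih =>
    intro s
    have hbeq : (x == k) = decide (k = x) := by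
      by_cases h : k = x
      · subst h; simp
      · have h2 : x ≠ k := fun he => h he.symm
        simp [h, h2]
    simp [PySem.List.enumerate_cons, ih, hbeq]

theorem pvStateOf_contains (l : List String) (k : String) :
    (pvStateOf l).contains k = decide (k ∈ l) := by
  simpa [pvStateOf, PySem.Dict.contains] using pvEnum_any l k 15

theorem pvStateOf_size (l : List String) : (pvStateOf l).size = l.length := by
  simp [pvStateOf, PySem.Dict.size, PySem.List.length_enumerate]

theorem pvStateOf_append (l : List String) (k : String) (h : k ∉ l) :
    (pvStateOf l).insert k (15 + (l.length : Int)) = pvStateOf (l ++ [k]) := by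
  apply PySem.Dict.ext
  rw [PySem.Dict.items_insert_of_not_contains]
  · simp [pvStateOf, PySem.List.enumerate_append, PySem.List.enumerate_cons,
      PySem.List.enumerate_nil]
  · simp [pvStateOf_contains, h]

theorem pvEnum_getD (l : List String) (k : String) (hnd : l.Nodup) (h : k ∈ l) :
    ∀ (s : Int), (PySem.Dict.mk ((PySem.List.enumerate l s).map (fun p => (p.2, p.1)))).getD k 0
      = s + (l.idxOf k : Int) := by
  induction l with
  | nil => cases h
  | cons x t ih =>
    intro s
    by_cases hx : x = k
    · subst hx
      simp [PySem.List.enumerate_cons, PySem.Dict.getD_eq_get?_getD,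
        PySem.Dict.get?_mk_cons]
    · have hkt : k ∈ t := by
        rcases List.mem_cons.mp h with h' | h'
        · exact absurd h'.symm hx
        · exact h'
      have := ih (List.nodup_cons.mp hnd).2 hkt (s + 1)
      rw [PySem.Dict.getD_eq_get?_getD] at this ⊢
      simp only [PySem.List.enumerate_cons, List.map_cons, PySem.Dict.get?_mk_cons]
      have hbeq : (x == k) = false := by simp [hx]
      rw [hbeq]
      simp only [Bool.false_eq_true, if_false]
      rw [this]
      have : (x :: t).idxOf k = t.idxOf k + 1 := by
        simp [hx]
      rw [this]
      push_cast
      ring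

theorem pvStateOf_getD (l : List String) (k : String) (hnd : l.Nodup) (h : k ∈ l) :
    (pvStateOf l).getD k 0 = 15 + (l.idxOf k : Int) := by
  simpa [pvStateOf] using pvEnum_getD l k hnd h 15

theorem pvB_inner (r : List (String × String)) : ∀ (acc : List String),
    r.foldl (fun d2 kv => pvSeenStep d2 kv.1) (pvStateOf acc)
    = pvStateOf (pvAKeysRow acc r) := by
  induction r with
  | nil => intro acc; simp [pvAKeysRow]
  | cons kv r ih =>
    intro acc
    by_cases h : kv.1 ∈ acc
    · have hstep : pvSeenStep (pvStateOf acc) kv.1 = pvStateOf acc := by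
        simp [pvSeenStep, pvStateOf_contains, h]
      have hA : pvAKeysRow acc (kv :: r) = pvAKeysRow acc r := by
        simp [pvAKeysRow, h]
      rw [hA, List.foldl_cons, hstep]
      exact ih acc
    · have hstep : pvSeenStep (pvStateOf acc) kv.1 = pvStateOf (acc ++ [kv.1]) := by
        rw [pvSeenStep]
        rw [pvStateOf_contains]
        simp only [h, decide_false, Bool.false_eq_true, if_false]
        rw [pvStateOf_size]
        have hlen : ((pvPreferredAlt.length : Int)) = (15 : Int) := by decide
        rw [hlen]
        exact pvStateOf_append acc kv.1 h
      have hA : pvAKeysRow acc (kv :: r) = pvAKeysRow (acc ++ [kv.1]) r := by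
        simp [pvAKeysRow, h]
      rw [hA, List.foldl_cons, hstep]
      exact ih (acc ++ [kv.1])

theorem pvB_state (rows : List (List (String × String))) : ∀ (acc : List String),
    rows.foldl (fun d r => r.foldl (fun d2 kv => pvSeenStep d2 kv.1) d) (pvStateOf acc)
    = pvStateOf (rows.foldl pvAKeysRow acc) := by
  induction rows with
  | nil => intro acc; simp
  | cons r rows ih =>
    intro acc
    simp only [List.foldl_cons, pvB_inner]
    exact ih (pvAKeysRow acc r)

theorem pvStateOf_keys (l : List String) : (pvStateOf l).keys = l := by
  simp [pvStateOf, PySem.Dict.keys, List.map_map, Function.comp_def,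
    PySem.List.map_snd_enumerate]

-- A's membership-append loop keeps the accumulator duplicate-free
theorem pvAKeysRow_nodup (r : List (String × String)) : ∀ (acc : List String),
    acc.Nodup → (pvAKeysRow acc r).Nodup := by
  induction r with
  | nil => intro acc h; simpa [pvAKeysRow] using h
  | cons kv r ih =>
    intro acc h
    by_cases hk : kv.1 ∈ acc
    · simpa [pvAKeysRow, hk] using ih acc h
    · have : (acc ++ [kv.1]).Nodup := by
        simp [List.nodup_append, h]
        exact fun a ha he => hk (he ▸ ha)
      simpa [pvAKeysRow, hk] using ih (acc ++ [kv.1]) this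

theorem pvAKeys_nodup (rows : List (List (String × String))) : ∀ (acc : List String),
    acc.Nodup → (rows.foldl pvAKeysRow acc).Nodup := by
  induction rows with
  | nil => intro acc h; simpa using h
  | cons r rows ih =>
    intro acc h
    exact ih (pvAKeysRow acc r) (pvAKeysRow_nodup r acc h)

-- A's extend loop on a duplicate-free key list is "append the keys not in base"
theorem pvExtend_eq (ks : List String) : ∀ (base : List String), ks.Nodup →
    ks.foldl (fun acc k => if k ∈ acc then acc else acc ++ [k]) base
    = base ++ ks.filter (fun k => !decide (k ∈ base)) := by
  induction ks with
  | nil => intro base _; simp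
  | cons k ks ih =>
    intro base hnd
    have hk : k ∉ ks := (List.nodup_cons.mp hnd).1
    have hnd' : ks.Nodup := (List.nodup_cons.mp hnd).2
    by_cases hb : k ∈ base
    · simp only [List.foldl_cons, List.filter_cons, hb]
      simpa using ih base hnd'
    · have hcongr : ks.filter (fun x => !decide (x ∈ base ++ [k]))
          = ks.filter (fun x => !decide (x ∈ base)) := by
        apply List.filter_congr
        intro x hx
        have : x ≠ k := fun h => hk (h ▸ hx)
        simp [List.mem_append, this]
      simp only [List.foldl_cons, if_neg hb]
      rw [ih (base ++ [k]) hnd', hcongr]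
      simp [hb]

-- a duplicate-free list is strictly increasing under idxOf
theorem pv_nodup_pairwise_idxOf (l : List String) (h : l.Nodup) :
    l.Pairwise (fun a b => l.idxOf a < l.idxOf b) := by
  induction l with
  | nil => exact List.Pairwise.nil
  | cons x t ih =>
    have hx : x ∉ t := (List.nodup_cons.mp h).1
    have ht : t.Nodup := (List.nodup_cons.mp h).2
    refine List.pairwise_cons.mpr ⟨?_, ?_⟩
    · intro b hb
      have hbx : b ≠ x := fun he => hx (he ▸ hb)
      simp [hbx.symm]
    · refine (ih ht).imp_of_mem ?_
      intro a b ha hb hab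
      have hax : a ≠ x := fun he => hx (he ▸ ha)
      have hbx : b ≠ x := fun he => hx (he ▸ hb)
      simpa [List.idxOf_cons, hax.symm, hbx.symm] using hab

-- the sorted call of B, evaluated: a strictly rank-increasing rearrangement
theorem pvKey_of_mem_pref (seen : PySem.Dict String Int) (a : String)
    (ha : a ∈ pvPreferredAlt) :
    (if pvRank.contains a then pvRank.getD a 0 else seen.getD a 0) = pvRank.getD a 0 := by
  have hc : pvRank.contains a = true := by
    rw [PySem.Dict.contains_eq_decide_mem_keys]
    have hkeys : pvRank.keys = pvPreferredAlt := by decide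
    rw [hkeys]; simpa using ha
  rw [hc]; simp

theorem pvKey_of_not_mem_pref (seen : PySem.Dict String Int) (a : String)
    (ha : a ∉ pvPreferredAlt) :
    (if pvRank.contains a then pvRank.getD a 0 else seen.getD a 0) = seen.getD a 0 := by
  have hc : pvRank.contains a = false := by
    rw [PySem.Dict.contains_eq_decide_mem_keys]
    have hkeys : pvRank.keys = pvPreferredAlt := by decide
    rw [hkeys]; simpa using ha
  rw [hc]; simp

theorem pv_sorted_eq (ak : List String) (hnd : ak.Nodup) :
    PySem.List.sorted ak
      (fun k => if pvRank.contains k then pvRank.getD k 0 else (pvStateOf ak).getD k 0) false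
    = pvPreferredAlt.filter (fun c => decide (c ∈ ak))
      ++ ak.filter (fun k => !decide (k ∈ pvPreferredAlt)) := by
  have hprefnd : pvPreferredAlt.Nodup := by decide
  apply PySem.List.sorted_eq_of_perm_of_pairwise_lt
  · -- permutation
    have p1 : (pvPreferredAlt.filter (fun c => decide (c ∈ ak))).Perm
        (ak.filter (fun k => decide (k ∈ pvPreferredAlt))) := by
      rw [List.perm_ext_iff_of_nodup (hprefnd.filter _) (hnd.filter _)]
      intro a
      simp [List.mem_filter, and_comm]
    have p2 : (ak.filter (fun k => decide (k ∈ pvPreferredAlt))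
        ++ ak.filter (fun k => !decide (k ∈ pvPreferredAlt))).Perm ak :=
      List.filter_append_perm _ ak
    exact (p1.append (List.Perm.refl _)).trans p2
  · -- strict increase of the rank key along the target list
    have hrankpair : pvPreferredAlt.Pairwise
        (fun a b => pvRank.getD a 0 < pvRank.getD b 0) := by decide
    have hranklow : ∀ a ∈ pvPreferredAlt, pvRank.getD a 0 ≤ 14 := by decide
    rw [List.pairwise_append]
    refine ⟨?_, ?_, ?_⟩
    · refine ((hrankpair.sublist (List.filter_sublist)).imp_of_mem ?_)
      intro a b ha hb hab
      have ha' := (List.mem_filter.mp ha).1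
      have hb' := (List.mem_filter.mp hb).1
      rw [pvKey_of_mem_pref _ _ ha', pvKey_of_mem_pref _ _ hb']
      exact hab
    · refine (((pv_nodup_pairwise_idxOf ak hnd).sublist (List.filter_sublist)).imp_of_mem ?_)
      intro a b ha hb hab
      have ha1 := (List.mem_filter.mp ha).1
      have ha2 : a ∉ pvPreferredAlt := by
        have := (List.mem_filter.mp ha).2; simpa using this
      have hb1 := (List.mem_filter.mp hb).1
      have hb2 : b ∉ pvPreferredAlt := by
        have := (List.mem_filter.mp hb).2; simpa using this
      rw [pvKey_of_not_mem_pref _ _ ha2, pvKey_of_not_mem_pref _ _ hb2]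
      rw [pvStateOf_getD ak a hnd ha1, pvStateOf_getD ak b hnd hb1]
      omega
    · intro a ha b hb
      have ha' := (List.mem_filter.mp ha).1
      have hb1 := (List.mem_filter.mp hb).1
      have hb2 : b ∉ pvPreferredAlt := by
        have := (List.mem_filter.mp hb).2; simpa using this
      rw [pvKey_of_mem_pref _ _ ha', pvKey_of_not_mem_pref _ _ hb2]
      rw [pvStateOf_getD ak b hnd hb1]
      have := hranklow a ha'
      omega

-- ===== VERDICT (by name: the statement is the Claim_ definition above) =====
theorem select_meetings_fields_py_spec : Claim_equal_select_meetings_fields_py := by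
  intro rows _
  unfold Spec_select_meetings_fields_py select_meetings_fields_py select_meetings_fields_py_alt
  by_cases hrows : rows = []
  · subst hrows; simp [PySem.List.sorted_eq_nil_iff]
  · simp only [if_neg hrows]
    have hempty : (PySem.Dict.empty : PySem.Dict String Int) = pvStateOf [] := rfl
    rw [hempty, pvB_state rows []]
    set ak := rows.foldl pvAKeysRow [] with hak
    have hnd : ak.Nodup := pvAKeys_nodup rows [] List.nodup_nil
    rw [pvStateOf_keys, pv_sorted_eq ak hnd]
    rw [pvExtend_eq ak _ hnd]
    have hpref : pvPreferredA = pvPreferredAlt := rfl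
    rw [hpref]
    congr 1
    apply List.filter_congr
    intro x hx
    simp [List.mem_filter, hx]
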